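-- pv_equiv track=rewrite | github.com/vucoffee2310/Collection | subtitles/keypair_processor.py | extract_n_non_whitespace
-- ===== SOURCE A (Python) =====
-- def extract_n_non_whitespace(text_source, n_chars_to_extract, from_start=True):
--     """
--     Extracts a segment from text_source containing n_chars_to_extract non-whitespace characters.
--     """
--     if not text_source or n_chars_to_extract <= 0: return ""
--     if from_start:
--         buffer = []; nw_count = 0
--         for char in text_source:
--             buffer.append(char)
--             if not char.isspace(): nw_count += 1
--             if nw_count == n_chars_to_extract: break
--         return "".join(buffer)
--     else: # from_end
--         nw_count = 0; start_idx_segment = len(text_source)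
--         for i in range(len(text_source) - 1, -1, -1):
--             start_idx_segment = i
--             if not text_source[i].isspace(): nw_count += 1
--             if nw_count == n_chars_to_extract: break
--         if nw_count < n_chars_to_extract and nw_count > 0: start_idx_segment = 0
--         elif nw_count == 0: return ""
--         return text_source[start_idx_segment:]
-- ===== SOURCE B (Python) =====
-- def extract_n_non_whitespace(text_source, n_chars_to_extract, from_start=True):
--     if not text_source or n_chars_to_extract <= 0:
--         return ""
--     idx = [i for i, c in enumerate(text_source) if not c.isspace()]
--     if from_start:
--         if len(idx) >= n_chars_to_extract:
--             return text_source[:idx[n_chars_to_extract - 1] + 1]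
--         return text_source
--     if not idx:
--         return ""
--     start = idx[-n_chars_to_extract] if len(idx) >= n_chars_to_extract else 0
--     return text_source[start:]
-- ===== Notes on version B (the rewrite author's own statement) =====
-- stated objective: simpler
-- what changed: B precomputes one table of all non-whitespace positions and answers both directions by direct indexing and a single slice, replacing A's two direction-specific scan-and-count loops with break/fallback state.
import Mathlib
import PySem

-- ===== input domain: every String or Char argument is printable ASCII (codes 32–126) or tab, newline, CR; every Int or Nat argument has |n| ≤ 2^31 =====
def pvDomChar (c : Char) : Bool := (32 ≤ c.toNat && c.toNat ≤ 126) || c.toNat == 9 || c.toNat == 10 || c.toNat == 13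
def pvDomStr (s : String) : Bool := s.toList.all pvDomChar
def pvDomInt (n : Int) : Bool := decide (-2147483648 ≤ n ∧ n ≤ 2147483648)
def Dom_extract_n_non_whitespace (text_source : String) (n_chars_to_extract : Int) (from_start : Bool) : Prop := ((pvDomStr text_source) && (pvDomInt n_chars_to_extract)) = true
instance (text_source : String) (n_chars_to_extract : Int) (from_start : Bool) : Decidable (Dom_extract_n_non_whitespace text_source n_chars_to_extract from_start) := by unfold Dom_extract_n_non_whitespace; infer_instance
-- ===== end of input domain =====

-- B replaces A's two scan-and-count loops by one precomputed table of non-whitespace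
-- positions plus direct indexing/slicing (objective: simpler decomposition, same cost).

-- ===== PORT A =====
-- the from_start loop: buffer/nw_count accumulation with break
def pvA_start (n : Int) : List Char → Int → List Char
  | [], _ => []
  | c :: rest, cnt =>
    let cnt' := if !(PySem.Chars.isspace c) then cnt + 1 else cnt
    if cnt' = n then [c] else c :: pvA_start n rest cnt'

-- the from_end loop over range(len-1, -1, -1): state (nw_count, start_idx_segment)
def pvA_end (t : List Char) (n : Int) : List Int → Int × Int → Int × Int
  | [], st => st
  | i :: rest, (cnt, _) =>
    let cnt' := if !(PySem.Chars.isspace (PySem.List.pyGetD t i ' ')) then cnt + 1 else cnt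
    if cnt' = n then (cnt', i) else pvA_end t n rest (cnt', i)

def extract_n_non_whitespace (text_source : String) (n_chars_to_extract : Int) (from_start : Bool) : String :=
  if text_source.toList = [] ∨ n_chars_to_extract ≤ 0 then "" else
  if from_start then
    -- "".join(buffer)
    String.ofList (pvA_start n_chars_to_extract text_source.toList 0)
  else
    let L := PySem.Str.len text_source
    let r := pvA_end text_source.toList n_chars_to_extract
              (PySem.List.pyRange (L - 1) (-1) (-1)) (0, L)
    if r.1 < n_chars_to_extract ∧ 0 < r.1 then PySem.Str.slice text_source (some 0) none
    else if r.1 = 0 then ""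
    else PySem.Str.slice text_source (some r.2) none

-- ===== PORT B =====
-- idx = [i for i, c in enumerate(text_source) if not c.isspace()]
def pvNwIdx (t : List Char) : List Int :=
  ((PySem.List.enumerate t 0).filter (fun p => !(PySem.Chars.isspace p.2))).map (·.1)

def extract_n_non_whitespace_alt (text_source : String) (n_chars_to_extract : Int) (from_start : Bool) : String :=
  if text_source.toList = [] ∨ n_chars_to_extract ≤ 0 then "" else
  let idx := pvNwIdx text_source.toList
  if from_start then
    if n_chars_to_extract ≤ (idx.length : Int) then
      PySem.Str.slice text_source none (some (PySem.List.pyGetD idx (n_chars_to_extract - 1) 0 + 1))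
    else text_source
  else if idx = [] then ""
  else
    let start := if n_chars_to_extract ≤ (idx.length : Int)
                 then PySem.List.pyGetD idx (-n_chars_to_extract) 0 else 0
    PySem.Str.slice text_source (some start) none

-- ===== PRECONDITION & SPEC =====
def Spec_extract_n_non_whitespace (text_source : String) (n_chars_to_extract : Int) (from_start : Bool) (out : String) : Prop := out = extract_n_non_whitespace_alt text_source n_chars_to_extract from_start
instance (text_source : String) (n_chars_to_extract : Int) (from_start : Bool) (out : String) : Decidable (Spec_extract_n_non_whitespace text_source n_chars_to_extract from_start out) := by unfold Spec_extract_n_non_whitespace; infer_instance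

-- ===== CLAIM (what is proved, stated in full; the proofs are below) =====
def Claim_equal_extract_n_non_whitespace : Prop := ∀ (text_source : String) (n_chars_to_extract : Int) (from_start : Bool), Dom_extract_n_non_whitespace text_source n_chars_to_extract from_start → Spec_extract_n_non_whitespace text_source n_chars_to_extract from_start (extract_n_non_whitespace text_source n_chars_to_extract from_start)

-- ===== LEMMAS AND PROOFS =====

-- positions (as Nats, ascending) of the non-whitespace characters of a list
def pvPos : List Char → List Nat
  | [] => []
  | c :: r => if PySem.Chars.isspace c then (pvPos r).map (· + 1)
              else 0 :: (pvPos r).map (· + 1)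

lemma pvNwIdx_gen (t : List Char) : ∀ s : Int,
    ((PySem.List.enumerate t s).filter (fun p => !(PySem.Chars.isspace p.2))).map (·.1)
      = (pvPos t).map (fun p : Nat => s + (p : Int)) := by
  induction t with
  | nil => intro s; simp [pvPos]
  | cons c r ih =>
    intro s
    rw [PySem.List.enumerate_cons]
    by_cases h : PySem.Chars.isspace c
    · rw [show pvPos (c :: r) = (pvPos r).map (· + 1) by simp [pvPos, h]]
      rw [List.filter_cons_of_neg (by simp [h]), ih (s + 1), List.map_map]
      apply List.map_congr_left; intro a _; simp [Function.comp]; push_cast; ring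
    · rw [show pvPos (c :: r) = 0 :: (pvPos r).map (· + 1) by simp [pvPos, h]]
      rw [List.filter_cons_of_pos (by simp [h]), List.map_cons, List.map_cons, ih (s + 1), List.map_map]
      refine List.cons_eq_cons.mpr ⟨by simp, ?_⟩
      apply List.map_congr_left; intro a _; simp [Function.comp]; push_cast; ring

lemma pvNwIdx_eq (t : List Char) : pvNwIdx t = (pvPos t).map (fun p : Nat => (p : Int)) := by
  have := pvNwIdx_gen t 0
  simpa [pvNwIdx] using this

lemma pvPos_append (xs : List Char) (x : Char) :
    pvPos (xs ++ [x]) = pvPos xs ++ (if PySem.Chars.isspace x then [] else [xs.length]) := by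
  induction xs with
  | nil => by_cases h : PySem.Chars.isspace x <;> simp [pvPos, h]
  | cons c r ih =>
    by_cases h : PySem.Chars.isspace c <;>
      by_cases h2 : PySem.Chars.isspace x <;>
      simp [pvPos, h, h2, ih]

-- A's from_start loop as a function of the remaining count
def pvF : List Char → Nat → List Char
  | [], _ => []
  | c :: r, k =>
    if PySem.Chars.isspace c then c :: pvF r k
    else if k = 1 then [c] else c :: pvF r (k - 1)

lemma pvA_start_eq_pvF (t : List Char) : ∀ n c : Int, c < n →
    pvA_start n t c = pvF t (n - c).toNat := by
  induction t with
  | nil => intro n c _; simp [pvA_start, pvF]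
  | cons ch r ih =>
    intro n c hc
    by_cases h : PySem.Chars.isspace ch
    · have hne : ¬ (c = n) := by omega
      simp [pvA_start, pvF, h, hne]
      exact ih n c hc
    · simp only [pvA_start, pvF, h, Bool.not_true, if_false, Bool.not_false, if_true]
      by_cases he : c + 1 = n
      · have : (n - c).toNat = 1 := by omega
        simp [he, this]
      · have h1 : (n - c).toNat ≠ 1 := by omega
        have h2 : (n - (c + 1)).toNat = (n - c).toNat - 1 := by omega
        simp [he, h1]
        rw [ih n (c + 1) (by omega), h2]

lemma pvF_spec (t : List Char) : ∀ k : Nat, 1 ≤ k →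
    pvF t k = if k ≤ (pvPos t).length then t.take ((pvPos t).getD (k - 1) 0 + 1) else t := by
  induction t with
  | nil => intro k hk; simp [pvF, pvPos]
  | cons c r ih =>
    intro k hk
    by_cases h : PySem.Chars.isspace c
    · rw [show pvF (c :: r) k = c :: pvF r k by simp [pvF, h]]
      rw [ih k hk]
      simp only [pvPos, h, if_true, List.length_map]
      by_cases hle : k ≤ (pvPos r).length
      · have hk1 : k - 1 < (pvPos r).length := by omega
        rw [if_pos hle, if_pos hle]
        rw [List.getD_eq_getElem _ _ (show k - 1 < ((pvPos r).map (· + 1)).length by simpa using hk1),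
            List.getD_eq_getElem _ _ hk1]
        simp [List.getElem_map, List.take_succ_cons]
      · rw [if_neg hle, if_neg hle]
    · rw [show pvPos (c :: r) = 0 :: (pvPos r).map (· + 1) by simp [pvPos, h]]
      by_cases hk1 : k = 1
      · subst hk1
        rw [show pvF (c :: r) 1 = [c] by simp [pvF, h]]
        rw [if_pos (by simp)]
        simp
      · rw [show pvF (c :: r) k = c :: pvF r (k - 1) by simp [pvF, h, hk1]]
        rw [ih (k - 1) (by omega)]
        by_cases hle : k - 1 ≤ (pvPos r).length
        · rw [if_pos hle,
              if_pos (show k ≤ ((0 : Nat) :: (pvPos r).map (· + 1)).length by simp; omega)]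
          rw [show k - 1 = (k - 2) + 1 by omega]
          simp only [Nat.add_sub_cancel, List.getD_cons_succ]
          rw [List.getD_eq_getElem _ _ (show k - 2 < ((pvPos r).map (· + 1)).length by simp; omega),
              List.getD_eq_getElem _ _ (show k - 2 < (pvPos r).length by omega)]
          simp [List.getElem_map, List.take_succ_cons]
        · rw [if_neg hle,
              if_neg (show ¬ (k ≤ ((0 : Nat) :: (pvPos r).map (· + 1)).length) by simp; omega)]

-- the descending index list [m-1, …, 0]
def pvDesc : Nat → List Int
  | 0 => []
  | m + 1 => (m : Int) :: pvDesc m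

lemma pvDesc_eq_map (m : Nat) : pvDesc m = (List.range m).map (fun k : Nat => (m : Int) - 1 - (k : Int)) := by
  induction m with
  | zero => simp [pvDesc]
  | succ m ih =>
    rw [List.range_succ_eq_map, List.map_cons, List.map_map]
    show ((m : Int)) :: pvDesc m = _
    refine List.cons_eq_cons.mpr ⟨by push_cast; ring, ?_⟩
    rw [ih]
    apply List.map_congr_left; intro a _
    simp [Function.comp, Nat.succ_eq_add_one]; push_cast; ring

lemma pyRange_desc (m : Nat) :
    PySem.List.pyRange ((m : Int) - 1) (-1) (-1) = pvDesc m := by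
  rw [PySem.List.pyRange_of_neg _ _ (by norm_num)]
  rw [pvDesc_eq_map]
  rcases Nat.eq_zero_or_pos m with h | h
  · subst h; norm_num
  · have hlt : (-1 : Int) < (m : Int) - 1 := by
      have : (1 : Int) ≤ (m : Int) := by exact_mod_cast h
      omega
    rw [if_pos hlt]
    have : ((m : Int) - 1 - -1 + - -1 - 1) / - -1 = (m : Int) := by ring_nf; omega
    rw [this]
    simp only [Int.toNat_natCast]
    apply List.map_congr_left; intro a _; push_cast; ring

lemma pvA_end_spec (t : List Char) : ∀ (m : Nat) (n c s : Int), m ≤ t.length → c < n →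
    pvA_end t n (pvDesc m) (c, s) =
      (if n ≤ c + ((pvPos (t.take m)).length : Int)
       then (n, ((pvPos (t.take m)).getD ((pvPos (t.take m)).length - (n - c).toNat) 0 : Int))
       else (c + ((pvPos (t.take m)).length : Int), if m = 0 then s else 0)) := by
  intro m
  induction m with
  | zero =>
    intro n c s _ hc
    simp [pvDesc, pvA_end, pvPos]
    omega
  | succ m ih =>
    intro n c s hm hc
    have hmt : m < t.length := by omega
    have htake : t.take (m + 1) = t.take m ++ [t[m]] := by
      rw [List.take_add_one]
      simp [List.getElem?_eq_getElem hmt]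
    have hlen : (t.take m).length = m := by simp; omega
    have hget : PySem.List.pyGetD t (m : Int) ' ' = t[m] := by
      rw [PySem.List.pyGetD_eq_getElem t ' ' (by positivity) (by exact_mod_cast hmt)]
      simp
    rw [htake, pvPos_append, hlen]
    by_cases h : PySem.Chars.isspace t[m]
    · -- whitespace at m: count unchanged
      have hne : ¬ (c = n) := by omega
      rw [show pvA_end t n (pvDesc (m + 1)) (c, s) = pvA_end t n (pvDesc m) (c, (m : Int)) by
        simp [pvDesc, pvA_end, hget, h, hne]]
      rw [ih n c (m : Int) (by omega) hc]
      simp only [h, if_true, List.append_nil]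
      by_cases hz : m = 0
      · subst hz; simp
      · simp [hz]
    · -- non-whitespace at m
      rw [show (if PySem.Chars.isspace t[m] then ([] : List Nat) else [m]) = [m] by simp [h]]
      by_cases he : c + 1 = n
      · -- break here
        rw [show pvA_end t n (pvDesc (m + 1)) (c, s) = (c + 1, (m : Int)) by
          simp [pvDesc, pvA_end, hget, h, he]]
        have hlen2 : (pvPos (t.take m) ++ [m]).length = (pvPos (t.take m)).length + 1 := by simp
        have hcond : n ≤ c + (((pvPos (t.take m)).length : Int) + 1) := by omega
        rw [hlen2, if_pos (by push_cast; omega)]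
        have hnc : (n - c).toNat = 1 := by omega
        rw [hnc]
        have : (pvPos (t.take m)).length + 1 - 1 = (pvPos (t.take m)).length := by omega
        rw [this]
        rw [List.getD_eq_getElem _ _ (by simp)]
        simp [he]
      · have hlt : c + 1 < n := by omega
        rw [show pvA_end t n (pvDesc (m + 1)) (c, s) = pvA_end t n (pvDesc m) (c + 1, (m : Int)) by
          simp [pvDesc, pvA_end, hget, h, he]]
        rw [ih n (c + 1) (m : Int) (by omega) hlt]
        rw [show (pvPos (t.take m) ++ [m]).length = (pvPos (t.take m)).length + 1 by simp]
        by_cases hcond : n ≤ c + 1 + ((pvPos (t.take m)).length : Int)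
        · rw [if_pos hcond,
              if_pos (show n ≤ c + (((pvPos (t.take m)).length + 1 : Nat) : Int) by push_cast; omega)]
          have hidx : (pvPos (t.take m)).length - (n - (c + 1)).toNat < (pvPos (t.take m)).length := by
            omega
          rw [show (pvPos (t.take m)).length + 1 - (n - c).toNat
                = (pvPos (t.take m)).length - (n - (c + 1)).toNat by omega]
          rw [List.getD_eq_getElem _ _
                (show (pvPos (t.take m)).length - (n - (c + 1)).toNat
                    < (pvPos (t.take m) ++ [m]).length by simp; try omega),
              List.getD_eq_getElem _ _ hidx]
          rw [List.getElem_append_left hidx]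
        · rw [if_neg hcond,
              if_neg (show ¬ (n ≤ c + (((pvPos (t.take m)).length + 1 : Nat) : Int)) by push_cast; omega)]
          rw [show ((((pvPos (t.take m)).length + 1 : Nat)) : Int)
                = ((pvPos (t.take m)).length : Int) + 1 by push_cast; ring]
          by_cases hz : m = 0
          · subst hz; simp; try omega
          · simp [hz]; try omega

-- strings are equal iff their char lists are
lemma pvStrExt {x y : String} (h : x.toList = y.toList) : x = y := by
  have := congrArg String.ofList h
  simpa [String.ofList_toList] using this

-- ===== VERDICT (by name: the statement is the Claim_ definition above) =====
theorem extract_n_non_whitespace_spec : Claim_equal_extract_n_non_whitespace := by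
  intro text n fs _
  unfold Spec_extract_n_non_whitespace
  unfold extract_n_non_whitespace extract_n_non_whitespace_alt
  by_cases hg : text.toList = [] ∨ n ≤ 0
  · rcases hg with h | h
    · have hte : text = "" := pvStrExt (by simp [h])
      simp [hte]
    · simp [h]
  · rw [if_neg hg, if_neg hg]
    push_neg at hg
    obtain ⟨hne, hn⟩ := hg
    have hn1 : 1 ≤ n := by omega
    set t := text.toList with ht
    have hidx : pvNwIdx t = (pvPos t).map (fun p : Nat => (p : Int)) := pvNwIdx_eq t
    have hlenidx : ((pvNwIdx t).length : Int) = ((pvPos t).length : Int) := by rw [hidx]; simp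
    cases fs with
    | true =>
      simp only [if_true]
      rw [pvA_start_eq_pvF t n 0 (by omega)]
      have : (n - 0).toNat = n.toNat := by omega
      rw [this, pvF_spec t n.toNat (by omega)]
      by_cases hle : n ≤ ((pvNwIdx t).length : Int)
      · have hle' : n.toNat ≤ (pvPos t).length := by
          rw [hlenidx] at hle; omega
        rw [if_pos hle, if_pos hle']
        apply pvStrExt
        have hi : (n - 1).toNat < (pvPos t).length := by omega
        have hget : PySem.List.pyGetD (pvNwIdx t) (n - 1) 0 = ((pvPos t).getD (n.toNat - 1) 0 : Int) := by
          rw [hidx]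
          rw [PySem.List.pyGetD_eq_getElem _ _ (by omega) (by simp; omega)]
          simp only [List.getElem_map]
          rw [List.getD_eq_getElem _ _ (by omega)]
          congr 2
          omega
        rw [PySem.Str.toList_slice, hget]
        have h0 : (0:Int) ≤ ((pvPos t).getD (n.toNat - 1) 0 : Int) + 1 := by positivity
        rw [show PySem.Chars.slice t none (some (((pvPos t).getD (n.toNat - 1) 0 : Int) + 1))
              = PySem.List.slice t none (some (((pvPos t).getD (n.toNat - 1) 0 : Int) + 1)) from rfl]
        rw [PySem.List.slice_to t h0]
        rw [String.toList_ofList]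
        congr 1 <;> omega
      · have hle' : ¬ (n.toNat ≤ (pvPos t).length) := by rw [hlenidx] at hle; omega
        rw [if_neg hle, if_neg hle']
        exact pvStrExt (String.toList_ofList)
    | false =>
      simp only [Bool.false_eq_true, if_false]
      have hLlen : PySem.Str.len text = (t.length : Int) := by
        simp [PySem.Str.len_eq, ht]
      rw [hLlen, pyRange_desc t.length]
      rw [pvA_end_spec t t.length n 0 (t.length : Int) (by omega) (by omega)]
      rw [List.take_length]
      have htne : t.length ≠ 0 := by
        intro h0
        exact hne (List.eq_nil_of_length_eq_zero h0)
      by_cases hle : n ≤ 0 + (((pvPos t).length : Nat) : Int)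
      · -- enough non-whitespace characters
        rw [if_pos hle]
        have hlt : ¬ ((n : Int) < n ∧ 0 < n) := by omega
        simp only [hlt, if_false]
        have hn0 : ¬ (n = 0) := by omega
        simp only [hn0, if_false]
        have hidxne : ¬ (pvNwIdx t = []) := by
          rw [hidx]
          intro h0
          have : (pvPos t).length = 0 := by simpa using congrArg List.length h0
          omega
        rw [if_neg hidxne]
        have hleB : n ≤ ((pvNwIdx t).length : Int) := by rw [hlenidx]; omega
        rw [if_pos hleB]
        apply pvStrExt
        rw [PySem.Str.toList_slice, PySem.Str.toList_slice]
        congr 2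
        have hk : 0 < n.toNat ∧ n.toNat ≤ (pvNwIdx t).length := by
          rw [hidx]; simp; omega
        have hneg : -n = -((n.toNat : Nat) : Int) := by omega
        rw [hneg, PySem.List.pyGetD_neg_natCast _ _ _ hk.1 hk.2]
        simp only [hidx, List.getElem_map, List.length_map]
        rw [List.getD_eq_getElem _ _ (by omega)]
        congr 2 <;> omega
      · rw [if_neg hle]
        simp only [htne, if_false]
        by_cases hz : (pvPos t).length = 0
        · -- all whitespace
          have h1 : ¬ ((0 + (((pvPos t).length : Nat) : Int)) < n ∧ 0 < 0 + (((pvPos t).length : Nat) : Int)) := by omega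
          rw [if_neg h1]
          rw [if_pos (by omega)]
          have hidxnil : pvNwIdx t = [] := by
            rw [hidx]
            have hnil : pvPos t = [] := List.eq_nil_of_length_eq_zero hz
            rw [hnil]; rfl
          rw [if_pos hidxnil]
        · -- some but fewer than n
          have h1 : (0 + (((pvPos t).length : Nat) : Int)) < n ∧ 0 < 0 + (((pvPos t).length : Nat) : Int) := by
            constructor <;> omega
          rw [if_pos h1]
          have hidxne : ¬ (pvNwIdx t = []) := by
            rw [hidx]
            intro h0
            have : (pvPos t).length = 0 := by simpa using congrArg List.length h0
            omega
          rw [if_neg hidxne]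
          have hnleB : ¬ (n ≤ ((pvNwIdx t).length : Int)) := by rw [hlenidx]; omega
          rw [if_neg hnleB]
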